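-- pv_equiv track=rewrite | github.com/BdM-15/proj-theseus | src/inference/relationship_payloads.py | group_retype_updates
-- ===== SOURCE A (Python) =====
-- from collections import defaultdict
-- from typing import Any
--
-- def group_retype_updates(
--     updates: list[dict[str, Any]],
-- ) -> dict[tuple[str, str], list[dict[str, Any]]]:
--     """Group relationship retype updates by old/new type pair."""
--     batches: defaultdict[tuple[str, str], list[dict[str, Any]]] = defaultdict(list)
--     for update in updates:
--         key = (update["old_type"], update["new_type"])
--         batches[key].append(update)
--     return dict(batches)
-- ===== SOURCE B (Python) =====
-- def group_retype_updates(updates):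
--     """Group relationship retype updates by old/new type pair."""
--     keys = dict.fromkeys((u["old_type"], u["new_type"]) for u in updates)
--     return {
--         k: [u for u in updates if (u["old_type"], u["new_type"]) == k]
--         for k in keys
--     }
-- ===== Notes on version B (the rewrite author's own statement) =====
-- stated objective: alternative
-- what changed: Replaces the single-pass defaultdict accumulation with a two-phase decomposition: first collect the distinct (old_type, new_type) keys in order of first occurrence, then build each group by filtering the input list per key.
import Mathlib
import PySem

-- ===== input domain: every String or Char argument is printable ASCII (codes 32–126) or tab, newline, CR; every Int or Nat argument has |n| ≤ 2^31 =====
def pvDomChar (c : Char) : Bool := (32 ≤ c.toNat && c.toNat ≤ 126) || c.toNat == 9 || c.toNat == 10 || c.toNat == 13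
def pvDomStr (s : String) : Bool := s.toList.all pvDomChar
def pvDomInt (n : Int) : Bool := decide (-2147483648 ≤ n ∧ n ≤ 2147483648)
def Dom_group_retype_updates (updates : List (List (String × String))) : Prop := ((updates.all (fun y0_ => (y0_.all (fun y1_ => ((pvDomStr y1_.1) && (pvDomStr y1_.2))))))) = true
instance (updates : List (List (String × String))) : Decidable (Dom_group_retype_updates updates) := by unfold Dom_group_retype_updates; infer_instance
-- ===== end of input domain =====

-- B replaces A's single-pass defaultdict accumulation with a two-phase decomposition
-- (distinct keys in first-occurrence order, then one filter per key); same cost class, no speed claim.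

-- key = (update["old_type"], update["new_type"]); Pre_ guarantees both keys are present,
-- so the getD default "" is never the value used inside the claim.
def pvKey (u : List (String × String)) : String × String :=
  ((PySem.Dict.mk u).getD "old_type" "", (PySem.Dict.mk u).getD "new_type" "")

-- ===== PORT A =====
def group_retype_updates (updates : List (List (String × String))) : List (String × String × List (List (String × String))) :=
  let batches : PySem.Dict (String × String) (List (List (String × String))) :=
    updates.foldl (fun b u => b.modify (pvKey u) [] (fun l => l ++ [u])) PySem.Dict.empty
  batches.items.map (fun p => (p.1.1, p.1.2, p.2))

-- ===== PORT B =====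
def group_retype_updates_alt (updates : List (List (String × String))) : List (String × String × List (List (String × String))) :=
  (PySem.List.dedup (updates.map pvKey)).map
    (fun k => (k.1, k.2, updates.filter (fun u => pvKey u == k)))

-- ===== PRECONDITION & SPEC =====
-- Pre_ excludes exactly the inputs where the Python A raises KeyError: an update dict
-- missing the key "old_type" or "new_type".
def Pre_group_retype_updates (updates : List (List (String × String))) : Prop :=
  ∀ u ∈ updates, "old_type" ∈ u.map Prod.fst ∧ "new_type" ∈ u.map Prod.fst
instance (updates : List (List (String × String))) : Decidable (Pre_group_retype_updates updates) := by unfold Pre_group_retype_updates; infer_instance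

def pvWitness_group_retype_updates : (List (List (String × String))) :=
  [[("old_type", "person"), ("new_type", "agent"), ("id", "1")],
   [("old_type", "person"), ("new_type", "agent"), ("id", "2")],
   [("old_type", "org"), ("new_type", "group")]]

def Spec_group_retype_updates (updates : List (List (String × String))) (out : List (String × String × List (List (String × String)))) : Prop := out = group_retype_updates_alt updates
instance (updates : List (List (String × String))) (out : List (String × String × List (List (String × String)))) : Decidable (Spec_group_retype_updates updates out) := by unfold Spec_group_retype_updates; infer_instance

-- ===== CLAIM (what is proved, stated in full; the proofs are below) =====
def Claim_equal_group_retype_updates : Prop := ∀ (updates : List (List (String × String))), Dom_group_retype_updates updates → Pre_group_retype_updates updates → Spec_group_retype_updates updates (group_retype_updates updates)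

-- ===== LEMMAS AND PROOFS =====

-- The items of A's accumulated dict are exactly B's (key, filtered group) pairs.
theorem items_group_fold (updates : List (List (String × String))) :
    (updates.foldl (fun b u => b.modify (pvKey u) [] (fun l => l ++ [u]))
      (PySem.Dict.empty : PySem.Dict (String × String) (List (List (String × String))))).items
    = (PySem.List.dedup (updates.map pvKey)).map
        (fun k => (k, updates.filter (fun u => pvKey u == k))) := by
  have hfold : updates.foldl (fun b u => b.modify (pvKey u) [] (fun l => l ++ [u]))
      (PySem.Dict.empty : PySem.Dict (String × String) (List (List (String × String))))
      = (updates.map (fun u => (pvKey u, u))).foldl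
          (fun d p => d.modify p.1 [] (fun l => l ++ [p.2])) PySem.Dict.empty := by
    rw [List.foldl_map]
  have hnd : (updates.foldl (fun b u => b.modify (pvKey u) [] (fun l => l ++ [u]))
      (PySem.Dict.empty : PySem.Dict (String × String) (List (List (String × String))))).keys.Nodup := by
    exact PySem.Dict.nodup_keys_foldl_modify_key updates pvKey [] (fun _ u l => l ++ [u]) _
      (by simp [PySem.Dict.keys_empty])
  rw [PySem.Dict.items_eq_map_keys _ hnd []]
  have hkeys : (updates.foldl (fun b u => b.modify (pvKey u) [] (fun l => l ++ [u]))
      (PySem.Dict.empty : PySem.Dict (String × String) (List (List (String × String))))).keys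
      = PySem.List.dedup (updates.map pvKey) := by
    rw [PySem.Dict.keys_foldl_modify_key]
    simp [PySem.Dict.keys_empty, PySem.Set.update, PySem.List.dedup_eq_ofList,
      PySem.Set.ofList_eq_foldl]
  rw [hkeys]
  apply List.map_congr_left
  intro k _
  congr 1
  rw [hfold, PySem.Dict.getD_foldl_modify_append]
  simp [PySem.Dict.getD_empty, List.filter_map, Function.comp_def]

-- ===== VERDICT (by name: the statement is the Claim_ definition above) =====
theorem group_retype_updates_spec : Claim_equal_group_retype_updates := by
  intro updates _ _
  show group_retype_updates updates = group_retype_updates_alt updates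
  simp only [group_retype_updates, group_retype_updates_alt]
  rw [items_group_fold, List.map_map]
  rfl
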